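-- pv_equiv track=rewrite | github.com/heraclixus/function_fm_OT | util/ot_monitoring.py | _extract_short_method_name
-- ===== SOURCE A (Python) =====
-- def _extract_short_method_name(method_name: str) -> str:
--     """Extract short method name by removing common dataset prefixes."""
--     if not method_name:
--         return method_name
--
--     parts = method_name.split('_')
--     # Find where the OT method starts
--     for i, part in enumerate(parts):
--         if part in ['independent', 'gaussian', 'euclidean', 'rbf', 'signature']:
--             return '_'.join(parts[i:])
--     return method_name
-- ===== SOURCE B (Python) =====
-- def _extract_short_method_name(method_name: str) -> str:
--     """Extract short method name by scanning the raw string part-boundary by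
--     part-boundary, without building a list of parts."""
--     keywords = ('independent', 'gaussian', 'euclidean', 'rbf', 'signature')
--
--     def after_underscore(s):
--         for i, c in enumerate(s):
--             if c == '_':
--                 return s[i + 1:]
--         return None
--
--     rest = method_name
--     while True:
--         for kw in keywords:
--             if rest.startswith(kw) and (len(rest) == len(kw) or rest[len(kw)] == '_'):
--                 return rest
--         rest = after_underscore(rest)
--         if rest is None:
--             return method_name
-- ===== Notes on version B (the rewrite author's own statement) =====
-- stated objective: alternative
-- what changed: Instead of splitting the string into a list of parts and joining a suffix of them back, B scans the raw string suffix by suffix: it checks for a keyword at the current part boundary (start or right after an underscore, followed by '_' or end) and otherwise advances past the next underscore, returning the matching suffix directly with no part list and no join.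
import Mathlib
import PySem

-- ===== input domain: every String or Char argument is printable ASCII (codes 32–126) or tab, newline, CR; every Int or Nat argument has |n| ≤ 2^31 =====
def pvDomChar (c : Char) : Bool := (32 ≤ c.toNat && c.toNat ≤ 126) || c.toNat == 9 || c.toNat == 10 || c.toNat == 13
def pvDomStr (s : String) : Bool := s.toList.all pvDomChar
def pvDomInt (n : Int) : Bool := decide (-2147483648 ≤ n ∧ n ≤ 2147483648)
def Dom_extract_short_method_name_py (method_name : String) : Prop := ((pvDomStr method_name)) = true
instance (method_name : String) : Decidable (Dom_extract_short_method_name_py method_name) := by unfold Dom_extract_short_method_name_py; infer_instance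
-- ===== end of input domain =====

-- B replaces split-into-parts + join-of-suffix by a direct scan of the raw string over its
-- part boundaries, returning the matching suffix itself (alternative decomposition, no part list).

-- ===== PORT A =====
def pvKws : List String := ["independent", "gaussian", "euclidean", "rbf", "signature"]

def pvGoA (orig : String) : List String → String
  | [] => orig
  | p :: rest => if p ∈ pvKws then PySem.Str.join "_" (p :: rest) else pvGoA orig rest

def extract_short_method_name_py (method_name : String) : String :=
  if method_name = "" then method_name
  else pvGoA method_name ((PySem.Str.split? method_name "_").getD [])

-- ===== PORT B =====
def pvKwChars : List (List Char) :=
  ["independent".toList, "gaussian".toList, "euclidean".toList, "rbf".toList, "signature".toList]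

-- rest.startswith(kw) and (len(rest) == len(kw) or rest[len(kw)] == '_')
def pvBoundaryOk (rest kw : List Char) : Bool :=
  kw.isPrefixOf rest &&
    (match rest.drop kw.length with
     | [] => true
     | c :: _ => c == '_')

-- after_underscore: suffix after the first '_', None if there is none
def pvAfterUnderscore : List Char → Option (List Char)
  | [] => none
  | c :: cs => if c == '_' then some cs else pvAfterUnderscore cs

theorem pvAfterUnderscore_length : ∀ (cs cs' : List Char),
    pvAfterUnderscore cs = some cs' → cs'.length < cs.length := by
  intro cs
  induction cs with
  | nil => intro cs' h; simp [pvAfterUnderscore] at h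
  | cons c cs ih =>
    intro cs' h
    simp only [pvAfterUnderscore] at h
    by_cases hc : c = '_'
    · simp [hc] at h; simp [← h]
    · simp [hc] at h
      exact Nat.lt_trans (ih cs' h) (by simp)

def pvGoB (orig : String) (cs : List Char) : String :=
  if pvKwChars.any (fun kw => pvBoundaryOk cs kw) then String.ofList cs
  else
    match h : pvAfterUnderscore cs with
    | none => orig
    | some cs' => pvGoB orig cs'
termination_by cs.length
decreasing_by exact pvAfterUnderscore_length cs cs' h

def extract_short_method_name_py_alt (method_name : String) : String :=
  pvGoB method_name method_name.toList

-- ===== PRECONDITION & SPEC =====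
def Spec_extract_short_method_name_py (method_name : String) (out : String) : Prop := out = extract_short_method_name_py_alt method_name
instance (method_name : String) (out : String) : Decidable (Spec_extract_short_method_name_py method_name out) := by unfold Spec_extract_short_method_name_py; infer_instance

-- ===== CLAIM (what is proved, stated in full; the proofs are below) =====
def Claim_equal_extract_short_method_name_py : Prop := ∀ (method_name : String), Dom_extract_short_method_name_py method_name → Spec_extract_short_method_name_py method_name (extract_short_method_name_py method_name)

-- ===== LEMMAS AND PROOFS =====

-- simple structural recursion equal to Python's split('_')
def pvSplitU : List Char → List (List Char)
  | [] => [[]]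
  | c :: cs =>
    if c = '_' then [] :: pvSplitU cs
    else
      match pvSplitU cs with
      | [] => [[c]]
      | p :: ps => (c :: p) :: ps

theorem pvSplitU_ne_nil (cs : List Char) : pvSplitU cs ≠ [] := by
  cases cs with
  | nil => simp [pvSplitU]
  | cons c cs =>
    simp only [pvSplitU]
    split_ifs
    · simp
    · cases h : pvSplitU cs <;> simp

-- prepend x onto the head piece
def pvHP (x : List Char) : List (List Char) → List (List Char)
  | [] => [x]
  | p :: ps => (x ++ p) :: ps

theorem pvGo_cons (fuel : Nat) (c : Char) (rest cur : List Char) (acc : List (List Char)) :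
    PySem.Chars.splitOn.go ['_'] (fuel+1) (c :: rest) cur acc =
      if c = '_' then PySem.Chars.splitOn.go ['_'] fuel rest [] (cur.reverse :: acc)
      else PySem.Chars.splitOn.go ['_'] fuel rest (c :: cur) acc := by
  by_cases hc : c = '_'
  · simp [PySem.Chars.splitOn.go, List.isPrefixOf, hc]
  · simp only [PySem.Chars.splitOn.go, List.isPrefixOf, Bool.and_true, if_neg hc]
    rw [if_neg (by simpa using fun h => hc h.symm)]

theorem pvGo_nil (fuel : Nat) (cur : List Char) (acc : List (List Char)) :
    PySem.Chars.splitOn.go ['_'] fuel [] cur acc = (cur.reverse :: acc).reverse := by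
  cases fuel <;> simp [PySem.Chars.splitOn.go]

theorem pvGo_eq (fuel : Nat) : ∀ (l cur : List Char) (acc : List (List Char)), l.length ≤ fuel →
    PySem.Chars.splitOn.go ['_'] fuel l cur acc = acc.reverse ++ pvHP cur.reverse (pvSplitU l) := by
  induction fuel with
  | zero =>
    intro l cur acc hl
    have hnil : l = [] := by simpa using hl
    subst hnil
    simp [pvGo_nil, pvSplitU, pvHP]
  | succ fuel ih =>
    intro l cur acc hl
    cases l with
    | nil => simp [pvGo_nil, pvSplitU, pvHP]
    | cons c rest =>
      have hr : rest.length ≤ fuel := by simpa using hl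
      rw [pvGo_cons]
      by_cases hc : c = '_'
      · rw [if_pos hc, ih rest [] _ hr]
        subst hc
        simp only [pvSplitU, List.reverse_cons, List.reverse_nil]
        cases h : pvSplitU rest with
        | nil => exact absurd h (pvSplitU_ne_nil rest)
        | cons p ps => simp [pvHP]
      · rw [if_neg hc, ih rest (c :: cur) _ hr]
        simp only [pvSplitU, if_neg hc]
        cases h : pvSplitU rest with
        | nil => exact absurd h (pvSplitU_ne_nil rest)
        | cons p ps => simp [pvHP]

theorem pvSplitOn_underscore (cs : List Char) :
    PySem.Chars.splitOn cs ['_'] = pvSplitU cs := by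
  unfold PySem.Chars.splitOn
  rw [pvGo_eq (cs.length + 1) cs [] [] (by omega)]
  cases h : pvSplitU cs with
  | nil => exact absurd h (pvSplitU_ne_nil cs)
  | cons p ps => simp [pvHP]

theorem pvOfList_eq_iff (p : List Char) (s : String) :
    String.ofList p = s ↔ p = s.toList := by
  constructor
  · intro h; simpa using congrArg String.toList h
  · intro h; subst h; exact String.ofList_toList

theorem pvStrSplit (m : String) :
    (PySem.Str.split? m "_").getD [] = (pvSplitU m.toList).map String.ofList := by
  have h := PySem.Str.split?_map m "_"
  have hsep : ("_" : String).toList = ['_'] := by decide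
  rw [hsep] at h
  unfold PySem.Chars.split? at h
  simp only [pvSplitOn_underscore] at h
  rw [if_neg (by simp)] at h
  cases e : PySem.Str.split? m "_" with
  | none => rw [e] at h; simp at h
  | some L =>
    rw [e] at h
    simp only [Option.map_some, Option.some.injEq] at h
    have hL : L = (pvSplitU m.toList).map String.ofList := by
      rw [← h]
      simp [List.map_map, Function.comp_def, String.ofList_toList]
    simp [hL]

-- first part: take while not underscore
def pvFP (cs : List Char) : List Char := cs.takeWhile (fun c => !(c == '_'))

def pvRestParts (cs : List Char) : List (List Char) :=
  match pvAfterUnderscore cs with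
  | none => []
  | some cs' => pvSplitU cs'

theorem pvSplitU_eq (cs : List Char) : pvSplitU cs = pvFP cs :: pvRestParts cs := by
  induction cs with
  | nil => simp [pvSplitU, pvFP, pvRestParts, pvAfterUnderscore]
  | cons c cs ih =>
    by_cases hc : c = '_'
    · simp [pvSplitU, pvFP, pvRestParts, pvAfterUnderscore, hc]
    · simp only [pvSplitU, if_neg hc, ih]
      simp [pvFP, pvRestParts, pvAfterUnderscore, hc]

theorem pvDropLen (p : Char → Bool) : ∀ (cs : List Char),
    cs.drop (cs.takeWhile p).length = cs.dropWhile p := by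
  intro cs
  induction cs with
  | nil => simp
  | cons c cs ih =>
    by_cases h : p c <;> simp [List.takeWhile_cons, List.dropWhile_cons, h, ih]

theorem pvDropWhile_head (p : Char → Bool) : ∀ (cs : List Char) (d : Char) (ds : List Char),
    cs.dropWhile p = d :: ds → p d = false := by
  intro cs
  induction cs with
  | nil => intro d ds h; simp at h
  | cons c cs ih =>
    intro d ds h
    by_cases hc : p c
    · rw [List.dropWhile_cons, if_pos hc] at h
      exact ih d ds h
    · rw [List.dropWhile_cons, if_neg hc] at h
      cases h
      simpa using hc

theorem pvBoundaryOk_iff (cs kw : List Char) (hkw : '_' ∉ kw) :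
    pvBoundaryOk cs kw = true ↔ pvFP cs = kw := by
  unfold pvBoundaryOk
  rw [Bool.and_eq_true, List.isPrefixOf_iff_prefix]
  constructor
  · rintro ⟨⟨t, rfl⟩, hb⟩
    unfold pvFP
    have hall : kw.takeWhile (fun c => !(c == '_')) = kw := by
      rw [List.takeWhile_eq_self_iff]
      intro c hcmem
      simp only [Bool.not_eq_eq_eq_not, Bool.not_true, beq_eq_false_iff_ne]
      exact fun h => hkw (h ▸ hcmem)
    rw [List.takeWhile_append, hall, if_pos rfl]
    have hd : (kw ++ t).drop kw.length = t := List.drop_left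
    rw [hd] at hb
    cases t with
    | nil => simp
    | cons d ds =>
      have hdeq : d = '_' := by simpa using hb
      simp [hdeq]
  · intro h
    subst h
    refine ⟨List.takeWhile_prefix _, ?_⟩
    unfold pvFP
    rw [pvDropLen]
    cases hD : cs.dropWhile (fun c => !(c == '_')) with
    | nil => simp
    | cons d ds =>
      have hhead := pvDropWhile_head (fun c => !(c == '_')) cs d ds hD
      simpa using hhead

theorem pvNoUnderscore : ∀ kw ∈ pvKwChars, '_' ∉ kw := by decide

theorem pvAny_iff (cs : List Char) :
    (pvKwChars.any (fun kw => pvBoundaryOk cs kw) = true) ↔ pvFP cs ∈ pvKwChars := by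
  rw [List.any_eq_true]
  constructor
  · rintro ⟨kw, hmem, hb⟩
    rw [pvBoundaryOk_iff cs kw (pvNoUnderscore kw hmem)] at hb
    exact hb ▸ hmem
  · intro h
    exact ⟨_, h, (pvBoundaryOk_iff cs _ (pvNoUnderscore _ h)).mpr rfl⟩

theorem pvMem_iff (p : List Char) : (String.ofList p ∈ pvKws) ↔ p ∈ pvKwChars := by
  simp [pvKws, pvKwChars, pvOfList_eq_iff]

theorem pvJoin_splitU (cs : List Char) : PySem.Chars.join ['_'] (pvSplitU cs) = cs := by
  induction cs with
  | nil => simp [pvSplitU, PySem.Chars.join_singleton]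
  | cons c cs ih =>
    cases h : pvSplitU cs with
    | nil => exact absurd h (pvSplitU_ne_nil cs)
    | cons p ps =>
      rw [h] at ih
      by_cases hc : c = '_'
      · simp only [pvSplitU, if_pos hc, h, PySem.Chars.join_cons_cons]
        rw [ih, hc]; rfl
      · simp only [pvSplitU, if_neg hc, h]
        cases ps with
        | nil =>
          rw [PySem.Chars.join_singleton]
          rw [PySem.Chars.join_singleton] at ih
          rw [ih]
        | cons q qs =>
          rw [PySem.Chars.join_cons_cons]
          rw [PySem.Chars.join_cons_cons] at ih
          simp only [List.cons_append]
          rw [ih]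

theorem pvMain (n : Nat) : ∀ (cs : List Char), cs.length ≤ n → ∀ (orig : String),
    pvGoA orig ((pvSplitU cs).map String.ofList) = pvGoB orig cs := by
  induction n with
  | zero =>
    intro cs hl orig
    have hnil : cs = [] := by simpa using hl
    subst hnil
    rw [pvGoB]
    rw [if_neg (by decide)]
    simp only [pvSplitU, List.map_cons, List.map_nil, pvGoA]
    rw [if_neg (by decide)]
    simp [pvAfterUnderscore]
  | succ n ih =>
    intro cs hl orig
    rw [pvSplitU_eq cs, List.map_cons]
    by_cases hmem : pvFP cs ∈ pvKwChars
    · have hA : String.ofList (pvFP cs) ∈ pvKws := (pvMem_iff _).mpr hmem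
      have hB : pvKwChars.any (fun kw => pvBoundaryOk cs kw) = true := (pvAny_iff cs).mpr hmem
      rw [pvGoB, if_pos hB]
      simp only [pvGoA, if_pos hA]
      rw [← List.map_cons, ← pvSplitU_eq]
      have htl : (PySem.Str.join "_" ((pvSplitU cs).map String.ofList)).toList = cs := by
        rw [PySem.Str.toList_join]
        have hsep : ("_" : String).toList = ['_'] := by decide
        rw [hsep]
        have hmm : ((pvSplitU cs).map String.ofList).map String.toList = pvSplitU cs := by
          simp [List.map_map, Function.comp_def]
        rw [hmm, pvJoin_splitU]
      conv_rhs => rw [← htl]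
      rw [String.ofList_toList]
    · have hA : String.ofList (pvFP cs) ∉ pvKws := fun h => hmem ((pvMem_iff _).mp h)
      have hB : ¬ pvKwChars.any (fun kw => pvBoundaryOk cs kw) = true :=
        fun h => hmem ((pvAny_iff cs).mp h)
      rw [pvGoB, if_neg hB]
      simp only [pvGoA, if_neg hA]
      split
      · next hAU => simp [pvRestParts, hAU, pvGoA]
      · next cs' hAU =>
        simp only [pvRestParts, hAU]
        have hlt := pvAfterUnderscore_length cs cs' hAU
        exact ih cs' (by omega) orig

-- ===== VERDICT (by name: the statement is the Claim_ definition above) =====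
theorem extract_short_method_name_py_spec : Claim_equal_extract_short_method_name_py := by
  intro m _
  unfold Spec_extract_short_method_name_py extract_short_method_name_py extract_short_method_name_py_alt
  by_cases hm : m = ""
  · subst hm
    rw [if_pos rfl]
    have htl : ("" : String).toList = [] := by decide
    rw [htl, pvGoB]
    rw [if_neg (by decide)]
    simp [pvAfterUnderscore]
  · rw [if_neg hm, pvStrSplit]
    exact pvMain m.toList.length m.toList le_rfl m
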